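-- pv_equiv track=rewrite | github.com/wubek/ProjectEuler | euler/euler016.py | mul_str_number_and_2
-- ===== SOURCE A (Python) =====
-- def to_digit(char):
--     return ord(char) - ord("0")
--
-- def mul_str_number_and_2(str_number):
--     result, transfer, string_repr = [], 0, ""
--     for dig in reversed(str_number):
--         temp = to_digit(dig) * 2 + transfer
--         transfer = temp // 10
--         result.append(str(temp % 10))
--
--     if transfer > 0:
--         for char in reversed(str(transfer)):
--             result.append(char)
--
--     for char in reversed(result):
--         string_repr += char
--
--     return string_repr
-- ===== SOURCE B (Python) =====
-- # B: build the whole number once from the char codes, double it with one big-int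
-- # multiplication, then read the output digits back off the product arithmetically.
-- def mul_str_number_and_2(str_number):
--     n = len(str_number)
--     number = 0
--     for ch in str_number:
--         number = number * 10 + (ord(ch) - 48)
--     doubled = 2 * number
--     pw = 10 ** n
--     carry = doubled // pw
--     rem = doubled % pw
--     out = []
--     for _ in range(n):
--         rem, d = divmod(rem, 10)
--         out.append(chr(48 + d))
--     body = "".join(reversed(out))
--     return str(carry) + body if carry > 0 else body
-- ===== Notes on version B (the rewrite author's own statement) =====
-- stated objective: alternative
-- what changed: B replaces the per-character double-with-carry loop and list reversals by big-integer arithmetic: it folds the char codes into one integer, doubles it once, and reads the output digits back off the product with one divmod by 10**n and a divmod-by-10 extraction loop.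
import Mathlib
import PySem

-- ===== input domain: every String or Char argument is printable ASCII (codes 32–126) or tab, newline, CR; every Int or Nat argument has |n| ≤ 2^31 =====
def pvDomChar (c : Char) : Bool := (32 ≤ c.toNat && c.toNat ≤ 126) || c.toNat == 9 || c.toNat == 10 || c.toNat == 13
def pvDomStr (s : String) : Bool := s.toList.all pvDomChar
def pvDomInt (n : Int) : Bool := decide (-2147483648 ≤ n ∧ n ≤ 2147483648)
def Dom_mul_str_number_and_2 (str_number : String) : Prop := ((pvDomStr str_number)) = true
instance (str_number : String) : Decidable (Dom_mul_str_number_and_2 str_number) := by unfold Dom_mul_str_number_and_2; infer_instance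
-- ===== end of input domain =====

-- B replaces A's per-character double-with-carry loop by big-integer arithmetic (fold the
-- char codes into one integer, double it once, read the digits back off the product);
-- objective: alternative (not claimed faster).

-- ===== PORT A =====
def to_digit (char : Char) : Int := (char.toNat : Int) - 48

-- loop body of A's 'for dig in reversed(str_number)': result is a list of (1-char) strings
def mulStep (st : List (List Char) × Int) (dig : Char) : List (List Char) × Int :=
  let temp := to_digit dig * 2 + st.2
  (st.1 ++ [PySem.Int.toChars (PySem.Int.mod temp 10)], PySem.Int.floordiv temp 10)

def mul_str_number_and_2 (str_number : String) : String :=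
  let p := str_number.toList.reverse.foldl mulStep ([], 0)
  let result := if p.2 > 0 then p.1 ++ (PySem.Int.toChars p.2).reverse.map (fun c => [c]) else p.1
  String.ofList (result.reverse.foldl (fun acc s => acc ++ s) [])

-- ===== PORT B =====
-- loop body of B's 'for _ in range(n): rem, d = divmod(rem, 10); out.append(chr(48 + d))'
def altStep (st : Int × List Char) (_i : Nat) : Int × List Char :=
  (PySem.Int.floordiv st.1 10, st.2 ++ [Char.ofNat ((48 + PySem.Int.mod st.1 10).toNat)])

def mul_str_number_and_2_alt (str_number : String) : String :=
  let n := str_number.toList.length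
  let number := str_number.toList.foldl (fun acc ch => acc * 10 + ((ch.toNat : Int) - 48)) 0
  let doubled := 2 * number
  let pw : Int := 10 ^ n
  let carry := PySem.Int.floordiv doubled pw
  let rem := PySem.Int.mod doubled pw
  let p := (List.range n).foldl altStep (rem, [])
  let body := p.2.reverse
  if carry > 0 then String.ofList (PySem.Int.toChars carry ++ body) else String.ofList body

-- ===== PRECONDITION & SPEC =====
def Spec_mul_str_number_and_2 (str_number : String) (out : String) : Prop := out = mul_str_number_and_2_alt str_number
instance (str_number : String) (out : String) : Decidable (Spec_mul_str_number_and_2 str_number out) := by unfold Spec_mul_str_number_and_2; infer_instance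

-- ===== CLAIM (what is proved, stated in full; the proofs are below) =====
def Claim_equal_mul_str_number_and_2 : Prop := ∀ (str_number : String), Dom_mul_str_number_and_2 str_number → Spec_mul_str_number_and_2 str_number (mul_str_number_and_2 str_number)

-- ===== LEMMAS AND PROOFS =====

-- value of a digit-value list, LEAST-significant first
def lsdVal : List Char → Int
  | [] => 0
  | d :: t => to_digit d + 10 * lsdVal t

lemma lsdVal_append (l : List Char) (d : Char) :
    lsdVal (l ++ [d]) = lsdVal l + to_digit d * 10 ^ l.length := by
  induction l with
  | nil => simp [lsdVal]
  | cons h t ih => simp [lsdVal, ih]; ring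

-- B's parsing fold computes the value of the reversed char list
lemma foldl_num (cs : List Char) : ∀ acc : Int,
    cs.foldl (fun a ch => a * 10 + ((ch.toNat : Int) - 48)) acc
      = acc * 10 ^ cs.length + lsdVal cs.reverse := by
  induction cs with
  | nil => intro acc; simp [lsdVal]
  | cons c t ih =>
      intro acc
      simp only [List.foldl_cons, ih, List.reverse_cons, lsdVal_append, List.length_cons]
      simp only [to_digit, List.length_reverse]
      ring

lemma ediv_ten_pow_succ (a : Int) (i : Nat) : a / 10 / 10 ^ i = a / 10 ^ (i + 1) := by
  rw [Int.ediv_ediv_of_nonneg (by norm_num : (0:Int) ≤ 10)]; ring_nf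

-- A's carry loop: closed form for the accumulated digit strings and the final carry
lemma loopA (L : List Char) : ∀ (acc : List (List Char)) (c : Int),
    L.foldl mulStep (acc, c) =
      (acc ++ (List.range L.length).map
          (fun i => PySem.Int.toChars ((2 * lsdVal L + c) / 10 ^ i % 10)),
        (2 * lsdVal L + c) / 10 ^ L.length) := by
  induction L with
  | nil => intro acc c; simp [lsdVal]
  | cons d t ih =>
      intro acc c
      simp only [List.foldl_cons, mulStep, ih]
      have hT : 2 * lsdVal (d :: t) + c = (to_digit d * 2 + c) + 2 * lsdVal t * 10 := by
        simp [lsdVal]; ring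
      have hdiv : ∀ i : Nat,
          (2 * lsdVal t + PySem.Int.floordiv (to_digit d * 2 + c) 10) / 10 ^ i
            = (2 * lsdVal (d :: t) + c) / 10 ^ (i + 1) := by
        intro i
        rw [hT, PySem.Int.floordiv_eq_ediv_of_pos (by norm_num : (0:Int) < 10),
            ← ediv_ten_pow_succ,
            Int.add_mul_ediv_right _ _ (by norm_num : (10:Int) ≠ 0)]
        ring_nf
      have hmod : PySem.Int.mod (to_digit d * 2 + c) 10 = (2 * lsdVal (d :: t) + c) % 10 := by
        rw [hT, PySem.Int.mod_eq_emod_of_pos (by norm_num : (0:Int) < 10)]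
        have : to_digit d * 2 + c + 2 * lsdVal t * 10 = (to_digit d * 2 + c) + 10 * (2 * lsdVal t) := by ring
        rw [this, Int.add_mul_emod_self_left]
      simp only [Prod.mk.injEq]
      constructor
      · rw [List.append_assoc]
        congr 1
        rw [List.length_cons, List.range_succ_eq_map, List.map_cons, List.map_map]
        simp only [List.singleton_append, List.cons.injEq]
        refine ⟨?_, ?_⟩
        · rw [hmod, pow_zero, Int.ediv_one]
        · apply List.map_congr_left
          intro i _
          simp only [Function.comp_apply, hdiv i, Nat.succ_eq_add_one]
      · rw [List.length_cons, ← hdiv t.length]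
lemma loopB (n : Nat) : ∀ (r : Int) (out : List Char),
    (List.range n).foldl altStep (r, out) =
      (r / 10 ^ n,
        out ++ (List.range n).map (fun i => Char.ofNat ((48 + r / 10 ^ i % 10).toNat))) := by
  induction n with
  | zero => intro r out; simp
  | succ m ih =>
      intro r out
      rw [List.range_succ, List.foldl_append, ih]
      simp only [List.foldl_cons, List.foldl_nil, altStep]
      rw [PySem.Int.floordiv_eq_ediv_of_pos (by norm_num : (0:Int) < 10),
          PySem.Int.mod_eq_emod_of_pos (by norm_num : (0:Int) < 10)]
      simp only [Prod.mk.injEq]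
      constructor
      · rw [Int.ediv_ediv_of_nonneg (by positivity : (0:Int) ≤ 10 ^ m), ← pow_succ]
      · simp [List.map_append, List.append_assoc]

-- inside the low n digits, reducing mod 10^n does not change a base-10 digit
lemma emod_pow_digit (x : Int) (n i : Nat) (h : i < n) :
    x % 10 ^ n / 10 ^ i % 10 = x / 10 ^ i % 10 := by
  obtain ⟨k, hk⟩ : ∃ k, n = i + (k + 1) := ⟨n - i - 1, by omega⟩
  have hx : x % 10 ^ n = x + (-(10 ^ (k + 1) * (x / 10 ^ n))) * 10 ^ i := by
    rw [Int.emod_def, hk]; ring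
  rw [hx, Int.add_mul_ediv_right _ _ (by positivity : (10:Int) ^ i ≠ 0)]
  have : x / 10 ^ i + -(10 ^ (k + 1) * (x / 10 ^ n)) =
      x / 10 ^ i + 10 * (-(10 ^ k * (x / 10 ^ n))) := by ring
  rw [this, Int.add_mul_emod_self_left]

lemma toChars_digit (d : Int) (h0 : 0 ≤ d) (h1 : d < 10) :
    PySem.Int.toChars d = [Char.ofNat ((48 + d).toNat)] := by
  interval_cases d <;> rfl

lemma flatten_map_singleton {α β : Type} (l : List α) (g : α → β) :
    (l.map (fun x => [g x])).flatten = l.map g := by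
  induction l with
  | nil => rfl
  | cons h t ih => simp [ih]

lemma rev_flatten_singleton {α β : Type} (l : List α) (f : α → β) :
    (l.map (fun x => [f x])).reverse.flatten = l.reverse.map f := by
  rw [← List.map_reverse, flatten_map_singleton]

lemma rev_flatten_singleton_id {α : Type} (l : List α) :
    (l.map (fun x => [x])).reverse.flatten = l.reverse := by
  rw [rev_flatten_singleton l (fun x => x), List.map_id']

-- ===== VERDICT (by name: the statement is the Claim_ definition above) =====
theorem mul_str_number_and_2_spec : Claim_equal_mul_str_number_and_2 := by
  intro s _
  unfold Spec_mul_str_number_and_2 mul_str_number_and_2 mul_str_number_and_2_alt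
  simp only
  set cs := s.toList with hcs
  set n := cs.length with hn
  set V := lsdVal cs.reverse with hV
  -- A's loop
  rw [loopA]
  -- B's parse
  rw [foldl_num]
  simp only [zero_mul, zero_add, ← hn, ← hV, List.length_reverse]
  -- normalise B's floordiv/mod
  rw [PySem.Int.floordiv_eq_ediv_of_pos (by positivity : (0:Int) < 10 ^ n),
      PySem.Int.mod_eq_emod_of_pos (by positivity : (0:Int) < 10 ^ n)]
  rw [loopB]
  simp only [add_zero]
  -- digits of the reduced remainder equal digits of the product
  have hdig : (List.range n).map
        (fun i => Char.ofNat ((48 + 2 * V % 10 ^ n / 10 ^ i % 10).toNat))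
      = (List.range n).map (fun i => Char.ofNat ((48 + 2 * V / 10 ^ i % 10).toNat)) := by
    apply List.map_congr_left
    intro i hi
    rw [emod_pow_digit _ _ _ (List.mem_range.mp hi)]
  -- A's digit strings are singletons
  have hsing : (List.range n).map
        (fun i => PySem.Int.toChars (2 * V / 10 ^ i % 10))
      = (List.range n).map (fun i => [Char.ofNat ((48 + 2 * V / 10 ^ i % 10).toNat)]) := by
    apply List.map_congr_left
    intro i _
    exact toChars_digit _ (Int.emod_nonneg _ (by norm_num)) (Int.emod_lt_of_pos _ (by norm_num))
  by_cases hc : 2 * V / 10 ^ n > 0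
  · rw [if_pos hc, if_pos hc, PySem.List.foldl_append_eq_flatten, hdig, hsing]
    simp only [List.nil_append, List.reverse_append, List.flatten_append]
    rw [rev_flatten_singleton_id, List.reverse_reverse, rev_flatten_singleton, List.map_reverse]
  · rw [if_neg hc, if_neg hc, PySem.List.foldl_append_eq_flatten, hdig, hsing]
    simp only [List.nil_append]
    rw [rev_flatten_singleton, List.map_reverse]
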